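-- pv_equiv track=rewrite | github.com/sshariff01/prompt-optimizer | src/evaluator/feedback_analyzer.py | _are_similar_categories
-- ===== SOURCE A (Python) =====
-- def _are_similar_categories(expected: str, actual: str) -> bool:
--     """Check if two outputs represent similar categories.
--
--     Args:
--         expected: Expected output
--         actual: Actual output
--
--     Returns:
--         True if they're similar categories (e.g., positive vs neutral)
--     """
--     # Common similar pairs
--     similar_pairs = [
--         {"positive", "neutral"},
--         {"negative", "neutral"},
--         {"true", "false"},
--         {"yes", "no"},
--     ]
--
--     expected_lower = expected.lower()
--     actual_lower = actual.lower()
--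
--     for pair in similar_pairs:
--         if expected_lower in pair and actual_lower in pair:
--             return True
--
--     return False
-- ===== SOURCE B (Python) =====
-- def _are_similar_categories(expected: str, actual: str) -> bool:
--     """Check if two outputs represent similar categories (precomputed similarity map)."""
--     similar_pairs = [
--         ("positive", "neutral"),
--         ("negative", "neutral"),
--         ("true", "false"),
--         ("yes", "no"),
--     ]
--     sim_map = {}
--     for pair in similar_pairs:
--         for word in pair:
--             sim_map[word] = sim_map.get(word, set()) | set(pair)
--     return actual.lower() in sim_map.get(expected.lower(), set())
-- ===== Notes on version B (the rewrite author's own statement) =====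
-- stated objective: idiomatic
-- what changed: Replaces the scan over the four similar-pair sets by a word-to-neighbor-set map precomputed from the pairs, so the answer is a single lookup plus membership test.
import Mathlib
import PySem

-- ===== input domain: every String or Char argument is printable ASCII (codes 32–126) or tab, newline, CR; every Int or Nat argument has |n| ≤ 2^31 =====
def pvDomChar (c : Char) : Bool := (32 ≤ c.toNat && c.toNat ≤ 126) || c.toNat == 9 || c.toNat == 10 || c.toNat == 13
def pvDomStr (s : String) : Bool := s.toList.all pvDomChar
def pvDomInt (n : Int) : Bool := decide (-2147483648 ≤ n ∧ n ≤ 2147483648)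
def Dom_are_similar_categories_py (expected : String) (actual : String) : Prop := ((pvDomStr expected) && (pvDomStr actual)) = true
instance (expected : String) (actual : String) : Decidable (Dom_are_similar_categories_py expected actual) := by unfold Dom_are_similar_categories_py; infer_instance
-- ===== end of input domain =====

-- B replaces A's scan over the four similar-pairs by a precomputed word → neighbor-set map and a
-- single lookup-plus-membership test (alternative data representation; same constant cost).

-- ===== PORT A =====
-- the 'for pair in similar_pairs: if … return True' loop, with its early return
def similarLoopA (pairs : List (PySem.Set String)) (el al : String) : Bool :=
  match pairs with
  | [] => false
  | p :: rest =>
    if PySem.Set.contains p el && PySem.Set.contains p al then true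
    else similarLoopA rest el al

def are_similar_categories_py (expected : String) (actual : String) : Bool :=
  let similar_pairs : List (PySem.Set String) :=
    [PySem.Set.ofList ["positive", "neutral"],
     PySem.Set.ofList ["negative", "neutral"],
     PySem.Set.ofList ["true", "false"],
     PySem.Set.ofList ["yes", "no"]]
  let expected_lower := PySem.Str.lower expected
  let actual_lower := PySem.Str.lower actual
  similarLoopA similar_pairs expected_lower actual_lower

-- ===== PORT B =====
def similarPairsB : List (List String) :=
  [["positive", "neutral"], ["negative", "neutral"], ["true", "false"], ["yes", "no"]]

-- sim_map[word] = sim_map.get(word, set()) | set(pair), over all pairs and words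
def simMapB : PySem.Dict String (PySem.Set String) :=
  similarPairsB.foldl
    (fun d pair =>
      pair.foldl
        (fun d w => d.modify w PySem.Set.empty (fun s => PySem.Set.union s (PySem.Set.ofList pair)))
        d)
    PySem.Dict.empty

def are_similar_categories_py_alt (expected : String) (actual : String) : Bool :=
  PySem.Set.contains (simMapB.getD (PySem.Str.lower expected) PySem.Set.empty)
    (PySem.Str.lower actual)

-- ===== PRECONDITION & SPEC =====
def Spec_are_similar_categories_py (expected : String) (actual : String) (out : Bool) : Prop := out = are_similar_categories_py_alt expected actual
instance (expected : String) (actual : String) (out : Bool) : Decidable (Spec_are_similar_categories_py expected actual out) := by unfold Spec_are_similar_categories_py; infer_instance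

-- ===== CLAIM (what is proved, stated in full; the proofs are below) =====
def Claim_equal_are_similar_categories_py : Prop := ∀ (expected : String) (actual : String), Dom_are_similar_categories_py expected actual → Spec_are_similar_categories_py expected actual (are_similar_categories_py expected actual)

-- ===== LEMMAS AND PROOFS =====

-- the precomputed map, evaluated
theorem simMapB_eval : simMapB = PySem.Dict.mk
    [("positive", ["positive", "neutral"]),
     ("neutral", ["positive", "neutral", "negative"]),
     ("negative", ["negative", "neutral"]),
     ("true", ["true", "false"]),
     ("false", ["true", "false"]),
     ("yes", ["yes", "no"]),
     ("no", ["yes", "no"])] := by decide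

-- the core fact, on the already-lowercased strings
theorem core_eq (el al : String) :
    similarLoopA
      [PySem.Set.ofList ["positive", "neutral"],
       PySem.Set.ofList ["negative", "neutral"],
       PySem.Set.ofList ["true", "false"],
       PySem.Set.ofList ["yes", "no"]] el al
      = PySem.Set.contains (simMapB.getD el PySem.Set.empty) al := by
  rw [simMapB_eval]
  by_cases h1 : el = "positive"
  · subst h1
    simp [similarLoopA, PySem.Set.contains, PySem.Set.ofList, PySem.Set.add,
      PySem.Dict.getD_eq_get?_getD, PySem.Dict.get?_mk_cons]
  · by_cases h2 : el = "neutral"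
    · subst h2
      simp [similarLoopA, PySem.Set.contains, PySem.Set.ofList, PySem.Set.add,
        PySem.Dict.getD_eq_get?_getD, PySem.Dict.get?_mk_cons]
      by_cases hn : al = "neutral" <;> simp [hn]
    · by_cases h3 : el = "negative"
      · subst h3
        simp [similarLoopA, PySem.Set.contains, PySem.Set.ofList, PySem.Set.add,
          PySem.Dict.getD_eq_get?_getD, PySem.Dict.get?_mk_cons]
      · by_cases h4 : el = "true"
        · subst h4
          simp [similarLoopA, PySem.Set.contains, PySem.Set.ofList, PySem.Set.add,
            PySem.Dict.getD_eq_get?_getD, PySem.Dict.get?_mk_cons]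
        · by_cases h5 : el = "false"
          · subst h5
            simp [similarLoopA, PySem.Set.contains, PySem.Set.ofList, PySem.Set.add,
              PySem.Dict.getD_eq_get?_getD, PySem.Dict.get?_mk_cons]
          · by_cases h6 : el = "yes"
            · subst h6
              simp [similarLoopA, PySem.Set.contains, PySem.Set.ofList, PySem.Set.add,
                PySem.Dict.getD_eq_get?_getD, PySem.Dict.get?_mk_cons]
            · by_cases h7 : el = "no"
              · subst h7
                simp [similarLoopA, PySem.Set.contains, PySem.Set.ofList, PySem.Set.add,
                  PySem.Dict.getD_eq_get?_getD, PySem.Dict.get?_mk_cons]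
              · simp [similarLoopA, PySem.Set.contains, PySem.Set.ofList, PySem.Set.add,
                  PySem.Dict.getD_eq_get?_getD, PySem.Dict.get?, h1, h2, h3, h4, h5, h6, h7,
                  Ne.symm h1, Ne.symm h2, Ne.symm h3, Ne.symm h4, Ne.symm h5, Ne.symm h6, Ne.symm h7]

-- ===== VERDICT (by name: the statement is the Claim_ definition above) =====
theorem are_similar_categories_py_spec : Claim_equal_are_similar_categories_py := by
  intro expected actual _
  unfold Spec_are_similar_categories_py are_similar_categories_py are_similar_categories_py_alt
  exact core_eq (PySem.Str.lower expected) (PySem.Str.lower actual)
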